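-- pv_equiv track=rewrite | github.com/INK-USC/VisCOLL | data/flickr30k.py | _mask_phrase
-- ===== SOURCE A (Python) =====
-- def _mask_phrase(tokens, phrase_pos):
--     ret = []
--     for i, token in enumerate(tokens):
--         if phrase_pos[0] <= i < phrase_pos[1]:
--             ret.append('[MASK]')
--         else:
--             ret.append(token)
--     return ret
-- ===== SOURCE B (Python) =====
-- def _mask_phrase(tokens, phrase_pos):
--     lo = max(phrase_pos[0], 0)
--     hi = max(lo, min(phrase_pos[1], len(tokens)))
--     return tokens[:lo] + ['[MASK]'] * (hi - lo) + tokens[hi:]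
-- ===== Notes on version B (the rewrite author's own statement) =====
-- stated objective: idiomatic
-- what changed: B clamps the phrase bounds once and builds the result as three slices (prefix + replicated [MASK] block + suffix) instead of A's per-element index test inside an enumerate loop.
import Mathlib
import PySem

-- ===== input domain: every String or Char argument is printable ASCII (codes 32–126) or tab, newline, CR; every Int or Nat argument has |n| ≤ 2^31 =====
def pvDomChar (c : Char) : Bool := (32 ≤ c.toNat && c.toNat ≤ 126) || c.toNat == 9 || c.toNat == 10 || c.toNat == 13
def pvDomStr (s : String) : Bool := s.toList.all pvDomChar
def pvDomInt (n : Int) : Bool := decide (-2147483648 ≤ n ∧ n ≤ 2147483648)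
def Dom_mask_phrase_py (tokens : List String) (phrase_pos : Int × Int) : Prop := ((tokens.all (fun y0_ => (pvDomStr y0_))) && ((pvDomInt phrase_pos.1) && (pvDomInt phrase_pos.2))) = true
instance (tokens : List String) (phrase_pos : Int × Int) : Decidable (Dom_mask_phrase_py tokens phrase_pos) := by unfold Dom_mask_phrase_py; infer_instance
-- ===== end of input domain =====

-- B builds the result as three slices (prefix ++ replicated '[MASK]' block ++ suffix) from
-- clamped bounds instead of A's per-element index test; objective: idiomatic.


-- ===== PORT A =====
-- A: for i, token in enumerate(tokens): append '[MASK]' if pos[0] <= i < pos[1] else token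
def mask_phrase_py (tokens : List String) (phrase_pos : Int × Int) : List String :=
  (PySem.List.enumerate tokens).foldl
    (fun ret it =>
      ret ++ [if phrase_pos.1 ≤ it.1 ∧ it.1 < phrase_pos.2 then "[MASK]" else it.2]) []

-- ===== PORT B =====
-- B: lo/hi clamped to [0, len]; tokens[:lo] + ['[MASK]']*(hi-lo) + tokens[hi:]
-- (both slice indices are in [0, len], so Python slicing is exactly take/drop here)
def mask_phrase_py_alt (tokens : List String) (phrase_pos : Int × Int) : List String :=
  let lo : Int := max phrase_pos.1 0
  let hi : Int := max lo (min phrase_pos.2 (tokens.length : Int))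
  tokens.take lo.toNat ++ List.replicate (hi - lo).toNat "[MASK]" ++ tokens.drop hi.toNat

-- ===== PRECONDITION & SPEC =====
def Spec_mask_phrase_py (tokens : List String) (phrase_pos : Int × Int) (out : List String) : Prop := out = mask_phrase_py_alt tokens phrase_pos
instance (tokens : List String) (phrase_pos : Int × Int) (out : List String) : Decidable (Spec_mask_phrase_py tokens phrase_pos out) := by unfold Spec_mask_phrase_py; infer_instance

-- ===== CLAIM (what is proved, stated in full; the proofs are below) =====
def Claim_equal_mask_phrase_py : Prop := ∀ (tokens : List String) (phrase_pos : Int × Int), Dom_mask_phrase_py tokens phrase_pos → Spec_mask_phrase_py tokens phrase_pos (mask_phrase_py tokens phrase_pos)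

-- ===== LEMMAS AND PROOFS =====

theorem mask_foldl_eq_map (l : List (Int × String)) (f : Int × String → String) (acc : List String) :
    l.foldl (fun ret it => ret ++ [f it]) acc = acc ++ l.map f := by
  induction l generalizing acc with
  | nil => simp
  | cons x xs ih => simp [List.foldl, ih, List.append_assoc]

theorem mask_phrase_py_eq_map (tokens : List String) (phrase_pos : Int × Int) :
    mask_phrase_py tokens phrase_pos =
      (PySem.List.enumerate tokens).map
        (fun it => if phrase_pos.1 ≤ it.1 ∧ it.1 < phrase_pos.2 then "[MASK]" else it.2) := by
  unfold mask_phrase_py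
  rw [mask_foldl_eq_map]; simp

theorem mask_phrase_py_agree (tokens : List String) (phrase_pos : Int × Int) :
    mask_phrase_py tokens phrase_pos = mask_phrase_py_alt tokens phrase_pos := by
  rw [mask_phrase_py_eq_map]
  set a := phrase_pos.1 with ha
  set b := phrase_pos.2 with hb
  set lo : Int := max a 0 with hlo
  set hi : Int := max lo (min b (tokens.length : Int)) with hhi
  have halt : mask_phrase_py_alt tokens phrase_pos =
      tokens.take lo.toNat ++ List.replicate (hi - lo).toNat "[MASK]" ++ tokens.drop hi.toNat := rfl
  rw [halt]
  have hlo0 : 0 ≤ lo := le_max_right _ _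
  have hlohi : lo ≤ hi := le_max_left _ _
  apply List.ext_getElem
  · simp [PySem.List.length_enumerate]
    omega
  · intro i h1 h2
    simp only [List.getElem_map, PySem.List.getElem_enumerate]
    have hlen : i < tokens.length := by simpa [PySem.List.length_enumerate] using h1
    simp only [List.getElem_append, List.length_append, List.length_take, List.length_replicate,
      List.getElem_take, List.getElem_replicate, List.getElem_drop]
    split_ifs with hA hB hC hD hE
    · omega
    · rfl
    · -- A says mask but index fell in prefix: impossible
      exfalso; omega
    · -- A says mask, index in replicate block: both "[MASK]"
      rfl
    · exfalso; omega
    · -- suffix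
      congr 1
      omega

-- ===== VERDICT (by name: the statement is the Claim_ definition above) =====
theorem mask_phrase_py_spec : Claim_equal_mask_phrase_py := by
  intro tokens phrase_pos _
  exact mask_phrase_py_agree tokens phrase_pos
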